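-- pv_equiv track=rewrite | github.com/MartinPit/Python-Projects | Kakuro/kakuro.py | cells_from_partial
-- ===== SOURCE A (Python) =====
-- from typing import List, Tuple, Optional, Set
--
-- def cells_from_partial(total: int, partial: List[int]) -> List[List[int]]:
--     amount = total - sum(partial)
--     length = partial.count(0)
--     used, result = [], []
--     cells: List[List[int]] = []
--
--     for val in partial:
--         if val != 0:
--             used.append(val)
--
--     if len(used) != len(set(used)):
--         return []
--
--     if amount != 0 and length == 0:
--         return []
--
--     find_cells(amount, length, [], cells, set(used))
--     cells.sort()
--
--     for cell in cells:
--         pos = 0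
--         template = partial[:]
--
--         for i in range(len(template)):
--             if template[i] == 0:
--                 template[i] = cell[pos]
--                 pos += 1
--
--         result.append(template)
--     return result
--
-- def find_cells(total: int, length: int, current: List[int],
--                cells: List[List[int]], used: Set[int]) -> None:
--
--     if sum(current) == total and len(current) == length:
--         cells.append(current.copy())
--         return
--
--     elif sum(current) > total or len(current) > length:
--         return
--
--     else:
--         for val in range(1, 10):
--             if val not in used:
--                 current.append(val)
--                 used.add(val)
--                 find_cells(total, length, current, cells, used)
--                 current.pop()
--                 used.remove(val)
--
--         return
-- ===== SOURCE B (Python) =====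
-- from itertools import combinations, permutations
-- from typing import List
--
--
-- def cells_from_partial(total: int, partial: List[int]) -> List[List[int]]:
--     used = [v for v in partial if v != 0]
--     if len(used) != len(set(used)):
--         return []
--     amount = total - sum(partial)
--     length = partial.count(0)
--     if length == 0:
--         return [partial[:]] if amount == 0 else []
--     avail = [d for d in range(1, 10) if d not in used]
--     cells = sorted(p for c in combinations(avail, length) if sum(c) == amount
--                    for p in permutations(c))
--     result = []
--     for cell in cells:
--         it = iter(cell)
--         result.append([next(it) if v == 0 else v for v in partial])
--     return result
-- ===== Notes on version B (the rewrite author's own statement) =====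
-- stated objective: simpler
-- what changed: Replaces the pruned backtracking DFS (find_cells with mutable current/used sets) by a two-phase enumeration: itertools.combinations of the available digits filtered by sum, expanded with itertools.permutations, then sorted; the helper function and all backtracking state disappear.
import Mathlib
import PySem

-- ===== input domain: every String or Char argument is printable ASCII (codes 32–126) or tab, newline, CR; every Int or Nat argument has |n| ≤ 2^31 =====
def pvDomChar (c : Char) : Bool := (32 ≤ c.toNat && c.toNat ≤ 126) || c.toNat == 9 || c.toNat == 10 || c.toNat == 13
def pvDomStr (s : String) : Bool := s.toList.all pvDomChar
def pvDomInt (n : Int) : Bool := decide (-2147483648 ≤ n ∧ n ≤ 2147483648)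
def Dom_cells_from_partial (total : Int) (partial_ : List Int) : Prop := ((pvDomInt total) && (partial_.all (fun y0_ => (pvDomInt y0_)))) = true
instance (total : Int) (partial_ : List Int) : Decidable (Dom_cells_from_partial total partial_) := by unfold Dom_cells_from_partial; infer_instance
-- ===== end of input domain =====

-- B replaces A's pruned backtracking DFS by combinations-filter-permutations followed by one sort (objective: simpler).

-- ===== PORT A =====
-- find_cells: functional port of A's backtracking helper; the caller-visible result is the
-- final value of 'cells'.  'fuel' only makes the recursion structural: the Python recursion
-- depth is bounded by length+1 (it returns as soon as len(current) > length), and the port is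
-- always called with fuel = length+1, so the fuel-0 branch is unreachable.
def find_cells (fuel : Nat) (total : Int) (length : Nat) (current : List Int)
    (cells : List (List Int)) (used : PySem.Set Int) : List (List Int) :=
  match fuel with
  | 0 => cells
  | fuel + 1 =>
    if current.sum = total ∧ current.length = length then
      cells ++ [current]
    else if total < current.sum ∨ length < current.length then
      cells
    else
      (PySem.List.pyRange 1 10 1).foldl
        (fun cs val =>
          if val ∉ used then
            find_cells fuel total length (current ++ [val]) cs (PySem.Set.add used val)
          else cs)
        cells

-- the loop 'for i in range(len(template)): if template[i] == 0: template[i] = cell[pos]; pos += 1':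
-- pos advances exactly on zero entries, so it walks 'cell' in step with the zeros of 'template'.
-- cell[pos] is exact here: every cell produced by find_cells has exactly (count of zeros) entries,
-- so pos never leaves range (headD's default is unreachable).
def pv_fill_a : List Int → List Int → List Int
  | [], _ => []
  | t :: rest, cell =>
    if t = 0 then cell.headD 0 :: pv_fill_a rest cell.tail
    else t :: pv_fill_a rest cell

def cells_from_partial (total : Int) (partial_ : List Int) : List (List Int) :=
  let amount := total - partial_.sum
  let length := PySem.List.count partial_ 0
  let used := partial_.foldl (fun u v => if v ≠ 0 then u ++ [v] else u) []
  if used.length ≠ (PySem.Set.ofList used).length then []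
  else if amount ≠ 0 ∧ length = 0 then []
  else
    let cells := find_cells (length + 1) amount length [] [] (PySem.Set.ofList used)
    let cells := PySem.List.sorted cells (fun c => c) false
    cells.foldl (fun r cell => r ++ [pv_fill_a partial_ cell]) []

-- ===== PORT B =====
-- '[next(it) if v == 0 else v for v in partial]' with it = iter(cell): consume cell left to
-- right, one entry per zero of partial (cell always has exactly that many entries).
def pv_fill_b : List Int → List Int → List Int
  | [], _ => []
  | v :: rest, cell =>
    if v = 0 then cell.headD 0 :: pv_fill_b rest cell.tail
    else v :: pv_fill_b rest cell

-- itertools.combinations(avail, length) ported as List.sublistsLen, itertools.permutations(c)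
-- as List.permutations: same multiset of results; the enumeration order differs from CPython's
-- but is irrelevant, the whole list is sorted immediately after.
def cells_from_partial_alt (total : Int) (partial_ : List Int) : List (List Int) :=
  let used := partial_.filter (fun v => v != 0)
  if used.length ≠ (PySem.Set.ofList used).length then []
  else
    let amount := total - partial_.sum
    let length := PySem.List.count partial_ 0
    if length = 0 then (if amount = 0 then [partial_] else [])
    else
      let avail := (PySem.List.pyRange 1 10 1).filter (fun d => !used.contains d)
      let cells := PySem.List.sorted
        (((List.sublistsLen length avail).filter (fun c => c.sum == amount)).flatMap
          (fun c => c.permutations)) (fun c => c) false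
      cells.map (fun cell => pv_fill_b partial_ cell)

-- ===== PRECONDITION & SPEC =====
def Spec_cells_from_partial (total : Int) (partial_ : List Int) (out : List (List Int)) : Prop := out = cells_from_partial_alt total partial_
instance (total : Int) (partial_ : List Int) (out : List (List Int)) : Decidable (Spec_cells_from_partial total partial_ out) := by unfold Spec_cells_from_partial; infer_instance

-- ===== CLAIM (what is proved, stated in full; the proofs are below) =====
def Claim_equal_cells_from_partial : Prop := ∀ (total : Int) (partial_ : List Int), Dom_cells_from_partial total partial_ → Spec_cells_from_partial total partial_ (cells_from_partial total partial_)

-- ===== LEMMAS AND PROOFS =====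

-- proof-side skeleton of find_cells: the list of cells its DFS appends, without the accumulator
def pv_dfs (fuel : Nat) (total : Int) (length : Nat) (current : List Int)
    (used : PySem.Set Int) : List (List Int) :=
  match fuel with
  | 0 => []
  | fuel + 1 =>
    if current.sum = total ∧ current.length = length then [current]
    else if total < current.sum ∨ length < current.length then []
    else
      (PySem.List.pyRange 1 10 1).flatMap
        (fun val =>
          if val ∉ used then pv_dfs fuel total length (current ++ [val]) (PySem.Set.add used val)
          else [])

theorem find_cells_eq_dfs (fuel : Nat) (total : Int) (length : Nat) (current : List Int)
    (cells : List (List Int)) (used : PySem.Set Int) :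
    find_cells fuel total length current cells used = cells ++ pv_dfs fuel total length current used := by
  induction fuel generalizing current cells used with
  | zero => simp [find_cells, pv_dfs]
  | succ fuel ih =>
    simp only [find_cells, pv_dfs]
    split
    · rfl
    · split
      · simp
      · rw [PySem.List.foldl_congr_mem _ _
              (fun cs val => cs ++ (if val ∉ used then
                pv_dfs fuel total length (current ++ [val]) (PySem.Set.add used val) else [])) _
              (by intro acc x hx; by_cases hm : x ∈ used <;> simp [ih, hm])]
        rw [PySem.List.foldl_append_eq_flatMap]

-- the cells pv_dfs can emit from node (current, used): current extended by distinct fresh digits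
def pv_GoodExt (total : Int) (length : Nat) (current : List Int) (used : PySem.Set Int)
    (x : List Int) : Prop :=
  ∃ ext : List Int, x = current ++ ext ∧ current.length + ext.length = length ∧
    current.sum + ext.sum = total ∧ ext.Nodup ∧ ∀ d ∈ ext, (1 ≤ d ∧ d < 10) ∧ d ∉ used

theorem dfs_prefix {fuel : Nat} {total : Int} {length : Nat} {current x : List Int}
    {used : PySem.Set Int} (h : x ∈ pv_dfs fuel total length current used) :
    ∃ ext, x = current ++ ext := by
  induction fuel generalizing current used with
  | zero => simp [pv_dfs] at h
  | succ fuel ih =>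
    simp only [pv_dfs] at h
    split at h
    · simp at h; exact ⟨[], by simp [h]⟩
    · split at h
      · simp at h
      · simp only [List.mem_flatMap] at h
        obtain ⟨v, hv, hmem⟩ := h
        split at hmem
        · obtain ⟨ext, hx⟩ := ih hmem
          exact ⟨v :: ext, by simp [hx]⟩
        · simp at hmem

theorem dfs_nodup (fuel : Nat) (total : Int) (length : Nat) (current : List Int)
    (used : PySem.Set Int) : (pv_dfs fuel total length current used).Nodup := by
  induction fuel generalizing current used with
  | zero => simp [pv_dfs]
  | succ fuel ih =>
    simp only [pv_dfs]
    split
    · simp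
    · split
      · simp
      · rw [List.nodup_flatMap]
        refine ⟨fun v hv => ?_, ?_⟩
        · split
          · exact ih _ _
          · simp
        · refine List.Pairwise.imp ?_ (PySem.List.pairwise_lt_pyRange_one 1 10)
          intro v w hvw x hx1 hx2
          simp only at hx1 hx2
          split at hx1
          · split at hx2
            · obtain ⟨e1, h1⟩ := dfs_prefix hx1
              obtain ⟨e2, h2⟩ := dfs_prefix hx2
              have h3 : (current ++ [v]) ++ e1 = (current ++ [w]) ++ e2 := by rw [← h1, ← h2]
              simp only [List.append_assoc, List.singleton_append] at h3
              have h4 := List.append_cancel_left h3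
              simp only [List.cons.injEq] at h4
              exact absurd h4.1 (by omega)
            · simp at hx2
          · simp at hx1

theorem mem_dfs {fuel : Nat} {total : Int} {length : Nat} {current : List Int}
    {used : PySem.Set Int} (hf : length < fuel + current.length) (x : List Int) :
    x ∈ pv_dfs fuel total length current used ↔ pv_GoodExt total length current used x := by
  induction fuel generalizing current used with
  | zero =>
    simp only [pv_dfs, List.not_mem_nil, false_iff]
    rintro ⟨ext, rfl, hlen, -⟩
    omega
  | succ fuel ih =>
    simp only [pv_dfs]
    by_cases h1 : current.sum = total ∧ current.length = length
    · rw [if_pos h1]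
      simp only [List.mem_singleton]
      constructor
      · rintro rfl
        exact ⟨[], by simp, by simpa using h1.2, by simpa using h1.1, List.nodup_nil, by simp⟩
      · rintro ⟨ext, rfl, hlen, -, -, -⟩
        have hext : ext = [] := List.eq_nil_of_length_eq_zero (by omega)
        simp [hext]
    · rw [if_neg h1]
      by_cases h2 : total < current.sum ∨ length < current.length
      · rw [if_pos h2]
        simp only [List.not_mem_nil, false_iff]
        rintro ⟨ext, rfl, hlen, hsum, -, hdig⟩
        rcases h2 with h2 | h2
        · have hnn : 0 ≤ ext.sum :=
            List.sum_nonneg (fun d hd => by have := (hdig d hd).1.1; omega)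
          omega
        · omega
      · rw [if_neg h2]
        simp only [List.mem_flatMap]
        constructor
        · rintro ⟨v, hv, hmem⟩
          rw [PySem.List.mem_pyRange_one] at hv
          by_cases hvu : v ∈ used
          · simp [hvu] at hmem
          · rw [if_pos hvu] at hmem
            rw [ih (by simp; omega)] at hmem
            obtain ⟨ext, hx, hlen, hsum, hnd, hdig⟩ := hmem
            refine ⟨v :: ext, by simp [hx], by simp at hlen ⊢; omega,
              by simp [List.sum_append] at hsum ⊢; omega, ?_, ?_⟩
            · exact List.nodup_cons.mpr ⟨fun hin => ((hdig v hin).2 (by simp [PySem.Set.mem_add])), hnd⟩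
            · intro d hdm
              rcases List.mem_cons.mp hdm with rfl | hd
              · exact ⟨⟨hv.1, hv.2⟩, hvu⟩
              · obtain ⟨hdg, hdu⟩ := hdig d (by simpa using hd)
                refine ⟨hdg, fun hmem => hdu ?_⟩
                rw [PySem.Set.mem_add]
                exact Or.inl hmem
        · rintro ⟨ext, rfl, hlen, hsum, hnd, hdig⟩
          obtain - | ⟨v, ext'⟩ := ext
          · exact absurd ⟨by simpa using hsum, by simpa using hlen⟩ h1
          · have hdv := hdig v (by simp)
            obtain ⟨v_nodup, hnd'⟩ := List.nodup_cons.mp hnd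
            refine ⟨v, PySem.List.mem_pyRange_one.mpr ⟨hdv.1.1, hdv.1.2⟩, ?_⟩
            rw [if_pos hdv.2]
            rw [ih (by simp; omega)]
            refine ⟨ext', by simp, by simp at hlen ⊢; omega,
              by simp [List.sum_append] at hsum ⊢; omega, hnd', ?_⟩
            intro d hd
            obtain ⟨hdg, hdu⟩ := hdig d (by simp [hd])
            refine ⟨hdg, fun hmem => ?_⟩
            rcases (PySem.Set.mem_add used v d).mp hmem with h | rfl
            · exact hdu h
            · exact v_nodup hd

-- two permutation-equal sublists of a duplicate-free list are equal
theorem sublist_perm_eq {l c1 c2 : List Int} (h : l.Nodup) (s1 : c1.Sublist l)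
    (s2 : c2.Sublist l) (p : c1.Perm c2) : c1 = c2 := by
  induction l generalizing c1 c2 with
  | nil => rw [List.sublist_nil.mp s1, List.sublist_nil.mp s2]
  | cons a t ih =>
    obtain ⟨hat, htnd⟩ := List.nodup_cons.mp h
    rcases List.sublist_cons_iff.mp s1 with h1 | ⟨r1, rfl, h1⟩
    · rcases List.sublist_cons_iff.mp s2 with h2 | ⟨r2, rfl, h2⟩
      · exact ih htnd h1 h2 p
      · exact absurd (h1.subset (p.symm.subset List.mem_cons_self)) hat
    · rcases List.sublist_cons_iff.mp s2 with h2 | ⟨r2, rfl, h2⟩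
      · exact absurd (h2.subset (p.subset List.mem_cons_self)) hat
      · rw [ih htnd h1 h2 ((List.perm_cons a).mp p)]

-- membership in B's combinations-filter-permutations list
theorem mem_bcells {avail : List Int} (hnd : avail.Nodup) (len : Nat) (amount : Int)
    (x : List Int) :
    x ∈ ((List.sublistsLen len avail).filter (fun c => c.sum == amount)).flatMap
        (fun c => c.permutations)
      ↔ (x.length = len ∧ x.sum = amount ∧ x.Nodup ∧ ∀ d ∈ x, d ∈ avail) := by
  simp only [List.mem_flatMap, List.mem_filter, List.mem_sublistsLen, List.mem_permutations,
    beq_iff_eq]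
  constructor
  · rintro ⟨c, ⟨⟨hsub, hclen⟩, hcsum⟩, hperm⟩
    exact ⟨hperm.length_eq.trans hclen, hperm.sum_eq.trans hcsum,
      (hsub.nodup hnd).perm hperm.symm, fun d hd => hsub.subset (hperm.subset hd)⟩
  · rintro ⟨hlen, hsum, hxnd, hsubm⟩
    have hfil : (avail.filter (fun d => decide (d ∈ x))).Nodup := hnd.filter _
    have hperm : x.Perm (avail.filter (fun d => decide (d ∈ x))) := by
      rw [List.perm_ext_iff_of_nodup hxnd hfil]
      intro a
      simp only [List.mem_filter, decide_eq_true_eq]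
      exact ⟨fun ha => ⟨hsubm a ha, ha⟩, fun ha => ha.2⟩
    exact ⟨avail.filter (fun d => decide (d ∈ x)),
      ⟨⟨List.filter_sublist, hperm.length_eq.symm.trans hlen⟩,
        hperm.sum_eq.symm.trans hsum⟩, hperm⟩

theorem bcells_nodup {avail : List Int} (hnd : avail.Nodup) (len : Nat) (amount : Int) :
    (((List.sublistsLen len avail).filter (fun c => c.sum == amount)).flatMap
        (fun c => c.permutations)).Nodup := by
  rw [List.nodup_flatMap]
  have hsl : ((List.sublistsLen len avail).filter (fun c => c.sum == amount)).Nodup :=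
    (((List.sublistsLen_sublist_sublists' len avail).nodup
      (List.nodup_sublists'.mpr hnd))).filter _
  refine ⟨fun c hc => ?_, ?_⟩
  · exact List.nodup_permutations c
      ((List.mem_sublistsLen.mp (List.mem_filter.mp hc).1).1.nodup hnd)
  · refine hsl.imp_of_mem ?_
    intro c1 c2 h1 h2 hne x hx1 hx2
    have s1 := (List.mem_sublistsLen.mp (List.mem_filter.mp h1).1).1
    have s2 := (List.mem_sublistsLen.mp (List.mem_filter.mp h2).1).1
    have p1 := List.mem_permutations.mp hx1
    have p2 := List.mem_permutations.mp hx2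
    exact hne (sublist_perm_eq hnd s1 s2 (p1.symm.trans p2))

theorem fill_ab (l c : List Int) : pv_fill_a l c = pv_fill_b l c := by
  induction l generalizing c with
  | nil => rfl
  | cons t rest ih => simp only [pv_fill_a, pv_fill_b]; split <;> simp [ih]

theorem fill_a_no_zeros {l : List Int} (h : ∀ v ∈ l, v ≠ 0) (c : List Int) :
    pv_fill_a l c = l := by
  induction l with
  | nil => rfl
  | cons t rest ih =>
    simp only [pv_fill_a]
    rw [if_neg (h t (by simp)), ih (fun v hv => h v (by simp [hv]))]

-- PySem.List.sorted only consults 'decide (a < b)', so two LT instances whose orders agree sort alike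
theorem sorted_lt_congr {κ : Type} (i1 i2 : LT κ) (d1 : DecidableRel (@LT.lt κ i1))
    (d2 : DecidableRel (@LT.lt κ i2)) (hiff : ∀ a b : κ, (@LT.lt κ i1 a b) ↔ (@LT.lt κ i2 a b))
    (xs : List κ) :
    @PySem.List.sorted κ κ i1 d1 xs (fun x => x) false
      = @PySem.List.sorted κ κ i2 d2 xs (fun x => x) false := by
  rw [@PySem.List.sorted_eq_foldl_insertBy κ κ i1 d1 xs (fun x => x),
      @PySem.List.sorted_eq_foldl_insertBy κ κ i2 d2 xs (fun x => x)]
  congr 1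
  funext acc x
  congr 1
  funext a b
  exact decide_eq_decide.mpr (hiff a b)

-- sorting (with Python's lexicographic list order) is invariant under permutation of the input
theorem sorted_id_perm_eq (xs ys : List (List Int)) (h : xs.Perm ys) :
    PySem.List.sorted xs (fun c => c) false = PySem.List.sorted ys (fun c => c) false := by
  rw [sorted_lt_congr _ _ _ _ (fun a b => List.lt_iff_lex_lt a b) xs,
      sorted_lt_congr _ _ _ _ (fun a b => List.lt_iff_lex_lt a b) ys]
  exact PySem.List.sorted_eq_sorted_of_perm xs ys (fun c => c) (fun a b hh => hh) h

-- the two sides produce permutation-equal cell lists in the main case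
theorem cells_perm (amount : Int) (L : Nat) (usedl : List Int) :
    (pv_dfs (L + 1) amount L [] (PySem.Set.ofList usedl)).Perm
      (((List.sublistsLen L
          ((PySem.List.pyRange 1 10 1).filter (fun d => !usedl.contains d))).filter
            (fun c => c.sum == amount)).flatMap (fun c => c.permutations)) := by
  have hnd : ((PySem.List.pyRange 1 10 1).filter (fun d => !usedl.contains d)).Nodup :=
    (PySem.List.nodup_pyRange_one 1 10).filter _
  rw [List.perm_ext_iff_of_nodup (dfs_nodup _ _ _ _ _) (bcells_nodup hnd L amount)]
  intro x
  rw [mem_dfs (by simp), mem_bcells hnd]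
  unfold pv_GoodExt
  constructor
  · rintro ⟨ext, rfl, hlen, hsum, hnd', hdig⟩
    refine ⟨by simpa using hlen, by simpa using hsum, by simpa using hnd', ?_⟩
    intro d hd
    obtain ⟨hdg, hdu⟩ := hdig d (by simpa using hd)
    simp only [List.mem_filter, PySem.List.mem_pyRange_one, Bool.not_eq_true']
    refine ⟨⟨hdg.1, hdg.2⟩, ?_⟩
    simpa [PySem.Set.mem_ofList] using hdu
  · rintro ⟨hlen, hsum, hxnd, hsubm⟩
    refine ⟨x, by simp, by simpa using hlen, by simpa using hsum, hxnd, ?_⟩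
    intro d hd
    have := hsubm d hd
    simp only [List.mem_filter, PySem.List.mem_pyRange_one, Bool.not_eq_true'] at this
    refine ⟨⟨this.1.1, this.1.2⟩, ?_⟩
    simpa [PySem.Set.mem_ofList] using this.2

-- ===== VERDICT (by name: the statement is the Claim_ definition above) =====
theorem cells_from_partial_spec : Claim_equal_cells_from_partial := by
  intro total partial_ _
  unfold Spec_cells_from_partial cells_from_partial cells_from_partial_alt
  have hused : partial_.foldl (fun u v => if v ≠ 0 then u ++ [v] else u) ([] : List Int)
      = partial_.filter (fun v => v != 0) := by
    rw [PySem.List.foldl_append_ite_eq_filter, List.nil_append]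
    simp only [ne_eq, decide_not]; rfl
  simp only [hused]
  by_cases hdup : (partial_.filter (fun v => v != 0)).length
      ≠ (PySem.Set.ofList (partial_.filter (fun v => v != 0))).length
  · rw [if_pos hdup, if_pos hdup]
  · rw [if_neg hdup, if_neg hdup]
    by_cases hL : PySem.List.count partial_ 0 = 0
    · rw [if_pos hL]
      by_cases ha : total - partial_.sum = 0
      · rw [if_pos ha, if_neg (by simp [ha])]
        have hnz : ∀ v ∈ partial_, v ≠ 0 := by
          intro v hv rfl
          exact (List.count_eq_zero.mp (by rw [← PySem.List.count_eq]; exact hL)) hv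
        rw [hL, ha]
        have h1 : find_cells (0 + 1) 0 0 [] []
            (PySem.Set.ofList (partial_.filter (fun v => v != 0))) = [[]] := by
          simp [find_cells]
        rw [h1]
        have h2 : PySem.List.sorted [([] : List Int)] (fun c => c) false = [[]] := rfl
        rw [h2]
        simp [fill_a_no_zeros hnz]
      · rw [if_neg ha, if_pos ⟨ha, hL⟩]
    · rw [if_neg hL, if_neg (fun h => hL h.2)]
      rw [find_cells_eq_dfs, List.nil_append]
      rw [PySem.List.foldl_append_singleton_eq_map, List.nil_append]
      rw [sorted_id_perm_eq _ _
        (cells_perm (total - partial_.sum) (PySem.List.count partial_ 0)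
          (partial_.filter (fun v => v != 0)))]
      exact List.map_congr_left (fun cell _ => fill_ab partial_ cell)
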